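-- pv_equiv track=rewrite | github.com/CaitlynCarney/python_exercises | function_exercises.py | is_consonant
-- ===== SOURCE A (Python) =====
-- def is_consonant(word):
--     cons = ['b', 'c', 'd', 'f', 'g', 'h', 'j', 'k', 'l', 'm', 'n', 'p', 'q', 'r', 's', 't', 'v', 'w', 'x', 'y', 'z']
--     for con in cons:
--         if con in word:
--             answer = True
--             return answer
--         else:
--             answer = False
--     return answer
-- ===== SOURCE B (Python) =====
-- CONS = frozenset('bcdfghjklmnpqrstvwxyz')
--
-- def is_consonant(word):
--     return any(ch in CONS for ch in word)
-- ===== Notes on version B (the rewrite author's own statement) =====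
-- stated objective: idiomatic
-- what changed: B iterates over the word's characters testing membership in a precomputed consonant set (any(...)), instead of A's loop over the 21-consonant list doing a substring search in the word for each.
import Mathlib
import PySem

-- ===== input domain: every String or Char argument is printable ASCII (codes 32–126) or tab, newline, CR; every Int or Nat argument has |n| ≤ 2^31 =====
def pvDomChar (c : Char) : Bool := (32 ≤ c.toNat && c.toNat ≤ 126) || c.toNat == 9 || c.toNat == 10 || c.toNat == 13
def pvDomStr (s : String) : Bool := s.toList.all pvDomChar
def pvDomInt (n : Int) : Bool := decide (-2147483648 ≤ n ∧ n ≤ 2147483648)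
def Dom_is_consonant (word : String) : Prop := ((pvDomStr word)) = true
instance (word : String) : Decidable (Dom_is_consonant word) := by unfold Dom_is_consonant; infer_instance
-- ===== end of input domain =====

-- B tests each character of the word against a precomputed consonant set instead of
-- substring-searching the word for each of the 21 consonants (idiomatic rewrite).


-- ===== PORT A =====
-- cons = ['b', …, 'z'] (one-char strings, as in A)
def pvConsA : List String :=
  ["b","c","d","f","g","h","j","k","l","m","n","p","q","r","s","t","v","w","x","y","z"]

-- the for-loop with its 'answer' variable and early return; answer is False after a
-- non-matching iteration, so reaching the end of the list returns False
def pvLoopA (cs : List String) (word : String) : Bool :=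
  match cs with
  | [] => false
  | con :: rest => if PySem.Str.isIn con word then true else pvLoopA rest word

def is_consonant (word : String) : Bool := pvLoopA pvConsA word

-- ===== PORT B =====
-- CONS = frozenset('bcdfghjklmnpqrstvwxyz')
def pvConsB : PySem.Set Char :=
  PySem.Set.ofList "bcdfghjklmnpqrstvwxyz".toList

-- any(ch in CONS for ch in word)
def is_consonant_alt (word : String) : Bool :=
  word.toList.any (fun ch => PySem.Set.contains pvConsB ch)

-- ===== PRECONDITION & SPEC =====
def Spec_is_consonant (word : String) (out : Bool) : Prop := out = is_consonant_alt word
instance (word : String) (out : Bool) : Decidable (Spec_is_consonant word out) := by unfold Spec_is_consonant; infer_instance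

-- ===== CLAIM (what is proved, stated in full; the proofs are below) =====
def Claim_equal_is_consonant : Prop := ∀ (word : String), Dom_is_consonant word → Spec_is_consonant word (is_consonant word)

-- ===== LEMMAS AND PROOFS =====

def pvConsChars : List Char := "bcdfghjklmnpqrstvwxyz".toList

theorem pv_singleton_infix_iff (a : Char) (l : List Char) : [a] <:+: l ↔ a ∈ l := by
  constructor
  · intro h
    exact (List.singleton_sublist).mp h.sublist
  · intro h
    obtain ⟨s, t, rfl⟩ := List.append_of_mem h
    exact ⟨s, t, by simp⟩

-- A's loop is true iff some consonant of the list occurs in the word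
theorem pvLoopA_eq_any (cs : List String) (word : String) :
    pvLoopA cs word = cs.any (fun c => PySem.Str.isIn c word) := by
  induction cs with
  | nil => rfl
  | cons c rest ih =>
    rw [pvLoopA, List.any_cons, ih]
    cases PySem.Str.isIn c word <;> simp

theorem pvConsA_eq_map : pvConsA = pvConsChars.map (fun c => String.ofList [c]) := by rfl

theorem pv_A_iff (word : String) :
    is_consonant word = true ↔ ∃ c ∈ pvConsChars, c ∈ word.toList := by
  rw [is_consonant, pvLoopA_eq_any, pvConsA_eq_map, List.any_map, List.any_eq_true]
  refine exists_congr fun c => and_congr_right fun _ => ?_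
  rw [Function.comp_apply, PySem.Str.isIn_iff_infix]
  have h1 : (String.ofList [c]).toList = [c] := by simp
  rw [h1]
  exact pv_singleton_infix_iff c word.toList

theorem pv_B_iff (word : String) :
    is_consonant_alt word = true ↔ ∃ c ∈ pvConsChars, c ∈ word.toList := by
  rw [is_consonant_alt, List.any_eq_true]
  constructor
  · rintro ⟨ch, hch, hc⟩
    rw [PySem.Set.contains_iff] at hc
    unfold pvConsB at hc
    rw [PySem.Set.mem_ofList] at hc
    exact ⟨ch, hc, hch⟩
  · rintro ⟨c, hc, hmem⟩
    refine ⟨c, hmem, ?_⟩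
    rw [PySem.Set.contains_iff]
    unfold pvConsB
    rw [PySem.Set.mem_ofList]
    exact hc

-- ===== VERDICT (by name: the statement is the Claim_ definition above) =====
theorem is_consonant_spec : Claim_equal_is_consonant := by
  intro word _
  unfold Spec_is_consonant
  have h := (pv_A_iff word).trans (pv_B_iff word).symm
  cases hA : is_consonant word <;> cases hB : is_consonant_alt word <;>
    simp [hA, hB] at h ⊢
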